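-- pv_equiv track=rewrite | github.com/Carglglz/asyncmd | aioctl.py | tmdelta_fmt
-- ===== SOURCE A (Python) =====
-- def _dt_format(number):
--     n = str(int(number))
--     if len(n) == 1:
--         n = "0{}".format(n)
--         return n
--     else:
--         return n
--
-- def time_str(uptime_tuple):
--     upt = [_dt_format(i) for i in uptime_tuple[1:]]
--     up_str_1 = f"{uptime_tuple[0]} days, "
--     up_str_2 = f"{upt[0]}:{upt[1]}:{upt[2]}"
--     if uptime_tuple[0] > 0:
--         return up_str_1 + up_str_2
--     elif uptime_tuple[-2] > 0 or uptime_tuple[-3] > 0: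
--         return up_str_2
--     return f"{int(uptime_tuple[-1])} s"
--
-- def tmdelta_fmt(dt):
--     if dt < 0:
--         return f"the past by {tmdelta_fmt(abs(dt))} s"
--     dd, hh, mm, ss = (0, 0, 0, 0)
--     mm = dt // 60
--     ss = dt % 60
--     if mm:
--         pass
--     else:
--         return time_str((dd, hh, mm, ss))
--     hh = mm // 60
--     if hh:
--         mm = mm % 60
--     else:
--         return time_str((dd, hh, mm, ss))
--     dd = hh // 24
--     if dd:
--         hh = hh % 24
--     else:
--         return time_str((dd, hh, mm, ss))
--
--     return time_str((dd, hh, mm, ss))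
-- ===== SOURCE B (Python) =====
-- def tmdelta_fmt(dt):
--     if dt < 0:
--         return f"the past by {tmdelta_fmt(-dt)} s"
--     if dt < 60:
--         return f"{dt} s"
--     hms = ":".join(str(dt // k % m).zfill(2) for k, m in ((3600, 24), (60, 60), (1, 60)))
--     if dt < 86400:
--         return hms
--     return f"{dt // 86400} days, {hms}"
-- ===== Notes on version B (the rewrite author's own statement) =====
-- stated objective: alternative
-- what changed: Replaces A's cascading divmod chain with early returns through time_str/_dt_format by threshold tests on dt itself (dt<60, dt<86400) and independent per-unit extraction dt//k%m over a (divisor,modulus) table joined into hh:mm:ss; the helpers disappear.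
import Mathlib
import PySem

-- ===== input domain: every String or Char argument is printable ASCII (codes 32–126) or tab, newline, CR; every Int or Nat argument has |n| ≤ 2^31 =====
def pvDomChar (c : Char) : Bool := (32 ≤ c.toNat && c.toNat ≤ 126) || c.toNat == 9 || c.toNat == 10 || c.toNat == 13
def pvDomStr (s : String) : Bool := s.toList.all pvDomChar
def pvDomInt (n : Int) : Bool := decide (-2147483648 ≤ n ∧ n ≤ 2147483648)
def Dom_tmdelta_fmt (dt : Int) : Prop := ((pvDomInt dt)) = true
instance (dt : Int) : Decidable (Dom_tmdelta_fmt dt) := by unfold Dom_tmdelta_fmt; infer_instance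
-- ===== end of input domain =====

-- B replaces A's cascading divmod chain and the time_str/_dt_format helpers by threshold
-- tests on dt itself and independent per-unit extraction dt//k%m over a (divisor, modulus)
-- table joined into hh:mm:ss (objective: alternative).

-- ===== PORT A =====
-- _dt_format: n = str(int(number)); pad with "0" if a single character
def pvDtFormat (number : Int) : String :=
  let n := PySem.Int.toStr number
  if PySem.Str.len n = 1 then "0" ++ n else n

-- time_str(uptime_tuple); the 3-element comprehension over the fixed tuple tail is written
-- as its three elements; uptime_tuple[-2] is mm, uptime_tuple[-3] is hh, uptime_tuple[-1] is ss
def pvTimeStr (t : Int × Int × Int × Int) : String :=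
  let u0 := pvDtFormat t.2.1
  let u1 := pvDtFormat t.2.2.1
  let u2 := pvDtFormat t.2.2.2
  let up_str_1 := PySem.Int.toStr t.1 ++ " days, "
  let up_str_2 := u0 ++ ":" ++ u1 ++ ":" ++ u2
  if t.1 > 0 then up_str_1 ++ up_str_2
  else if t.2.2.1 > 0 ∨ t.2.1 > 0 then up_str_2
  else PySem.Int.toStr t.2.2.2 ++ " s"

def tmdelta_fmt (dt : Int) : String :=
  if _h : dt < 0 then "the past by " ++ tmdelta_fmt (-dt) ++ " s"
  else
    let dd : Int := 0
    let hh : Int := 0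
    let mm := PySem.Int.floordiv dt 60
    let ss := PySem.Int.mod dt 60
    if mm ≠ 0 then
      let hh := PySem.Int.floordiv mm 60
      if hh ≠ 0 then
        let mm := PySem.Int.mod mm 60
        let dd := PySem.Int.floordiv hh 24
        if dd ≠ 0 then
          let hh := PySem.Int.mod hh 24
          pvTimeStr (dd, hh, mm, ss)
        else pvTimeStr (dd, hh, mm, ss)
      else pvTimeStr (dd, hh, mm, ss)
    else pvTimeStr (dd, hh, mm, ss)
termination_by (if dt < 0 then 1 else 0 : Nat)
decreasing_by simp_all; omega

-- ===== PORT B =====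
def tmdelta_fmt_alt (dt : Int) : String :=
  if _h : dt < 0 then "the past by " ++ tmdelta_fmt_alt (-dt) ++ " s"
  else if dt < 60 then PySem.Int.toStr dt ++ " s"
  else
    -- ":".join(str(dt // k % m).zfill(2) for k, m in ((3600, 24), (60, 60), (1, 60)))
    let hms := PySem.Str.join ":"
      ((([((3600 : Int), (24 : Int)), (60, 60), (1, 60)]).map
        (fun p => PySem.Str.zfill (PySem.Int.toStr (PySem.Int.mod (PySem.Int.floordiv dt p.1) p.2)) 2)))
    if dt < 86400 then hms
    else PySem.Int.toStr (PySem.Int.floordiv dt 86400) ++ " days, " ++ hms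
termination_by (if dt < 0 then 1 else 0 : Nat)
decreasing_by simp_all; omega

-- ===== PRECONDITION & SPEC =====
def Spec_tmdelta_fmt (dt : Int) (out : String) : Prop := out = tmdelta_fmt_alt dt
instance (dt : Int) (out : String) : Decidable (Spec_tmdelta_fmt dt out) := by unfold Spec_tmdelta_fmt; infer_instance

-- ===== CLAIM (what is proved, stated in full; the proofs are below) =====
def Claim_equal_tmdelta_fmt : Prop := ∀ (dt : Int), Dom_tmdelta_fmt dt → Spec_tmdelta_fmt dt (tmdelta_fmt dt)

-- ===== LEMMAS AND PROOFS =====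

-- ":".join of three strings is the plain double-colon concatenation
theorem pvJoin3 (a b c : String) : PySem.Str.join ":" [a, b, c] = a ++ ":" ++ b ++ ":" ++ c := by
  apply String.toList_inj.mp
  simp [PySem.Str.toList_join, PySem.Chars.join, List.intercalate]

-- for 0 ≤ n < 60 (all unit values fed to the pads), zfill(·, 2) and A's _dt_format agree
theorem pvZf_nat : ∀ n : Nat, n < 60 →
    PySem.Str.zfill (PySem.Int.toStr (n : Int)) 2 = pvDtFormat (n : Int) := by decide

theorem pvZf (x : Int) (h0 : 0 ≤ x) (h1 : x < 60) :
    PySem.Str.zfill (PySem.Int.toStr x) 2 = pvDtFormat x := by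
  have := pvZf_nat x.toNat (by omega)
  simpa [Int.toNat_of_nonneg h0] using this

theorem tmdelta_eq_of_nonneg (dt : Int) (h : 0 ≤ dt) : tmdelta_fmt dt = tmdelta_fmt_alt dt := by
  rw [tmdelta_fmt, tmdelta_fmt_alt]
  have hneg : ¬ dt < 0 := by omega
  have efd : ∀ (a b : Int), 0 < b → PySem.Int.floordiv a b = a / b :=
    fun a b hb => PySem.Int.floordiv_eq_ediv_of_pos hb
  have emd : ∀ (a b : Int), 0 < b → PySem.Int.mod a b = a % b :=
    fun a b hb => PySem.Int.mod_eq_emod_of_pos hb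
  simp only [hneg, dif_neg, not_false_iff, List.map, efd _ _ (by omega : (0:Int) < 60),
    emd _ _ (by omega : (0:Int) < 60), efd _ _ (by omega : (0:Int) < 3600),
    emd _ _ (by omega : (0:Int) < 24), efd _ _ (by omega : (0:Int) < 1),
    emd _ _ (by omega : (0:Int) < 60), efd _ _ (by omega : (0:Int) < 24),
    efd _ _ (by omega : (0:Int) < 86400)]
  have hdiv1 : dt / 60 / 60 = dt / 3600 := by
    rw [Int.ediv_ediv_of_nonneg (by omega)]; norm_num
  have hdiv2 : dt / 3600 / 24 = dt / 86400 := by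
    rw [Int.ediv_ediv_of_nonneg (by omega)]; norm_num
  have hone : dt / 1 = dt := Int.ediv_one dt
  have hss0 : 0 ≤ dt % 60 := Int.emod_nonneg dt (by omega)
  have hss1 : dt % 60 < 60 := Int.emod_lt_of_pos dt (by omega)
  have hmm0 : 0 ≤ dt / 60 := Int.ediv_nonneg h (by omega)
  by_cases hm : dt / 60 = 0
  · -- dt < 60: A falls through to "{ss} s" with ss = dt % 60 = dt; B's first branch
    have hlt : dt < 60 := by
      by_contra hc
      have : 1 ≤ dt / 60 := Int.le_ediv_iff_mul_le (by omega) |>.mpr (by omega)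
      omega
    have hmod : dt % 60 = dt := Int.emod_eq_of_lt h hlt
    simp [hm, hlt, pvTimeStr, hmod]
  · have hge : ¬ dt < 60 := by
      by_contra hc
      have : dt / 60 = 0 := Int.ediv_eq_zero_of_lt h (by omega)
      exact hm this
    have hmmpos : 0 < dt / 60 := by omega
    have hhh0 : 0 ≤ dt / 3600 := Int.ediv_nonneg h (by omega)
    by_cases hh : dt / 3600 = 0
    · -- 60 ≤ dt < 3600: hh = 0, mm = dt/60 unreduced in A; dt/60 < 60 so the mods are no-ops
      have hmlt : dt / 60 < 60 := by
        by_contra hc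
        have : 1 ≤ dt / 60 / 60 := Int.le_ediv_iff_mul_le (by omega) |>.mpr (by omega)
        rw [hdiv1] at this; omega
      have hmmod : dt / 60 % 60 = dt / 60 := Int.emod_eq_of_lt (by omega) hmlt
      have hdlt : dt < 86400 := by
        by_contra hc
        have : 1 ≤ dt / 3600 := Int.le_ediv_iff_mul_le (by omega) |>.mpr (by omega)
        omega
      rw [hdiv1]
      simp only [hm, hh, if_neg hm, hge, if_neg hge, if_pos hdlt,
        pvJoin3, hone, hmmod, pvTimeStr]
      simp [hh, hmmpos, pvZf 0 (by omega) (by omega), pvZf (dt / 60) hmm0 hmlt,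
        pvZf (dt % 60) hss0 hss1]
    · have hhpos : 0 < dt / 3600 := by omega
      have hdd0 : 0 ≤ dt / 86400 := Int.ediv_nonneg h (by omega)
      have hmmod0 : 0 ≤ dt / 60 % 60 := Int.emod_nonneg _ (by omega)
      have hmmod1 : dt / 60 % 60 < 60 := Int.emod_lt_of_pos _ (by omega)
      by_cases hd : dt / 86400 = 0
      · -- 3600 ≤ dt < 86400: dd = 0, hh = dt/3600 unreduced in A; dt/3600 < 24
        have hhlt : dt / 3600 < 24 := by
          by_contra hc
          have : 1 ≤ dt / 3600 / 24 := Int.le_ediv_iff_mul_le (by omega) |>.mpr (by omega)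
          rw [hdiv2] at this; omega
        have hhmod : dt / 3600 % 24 = dt / 3600 := Int.emod_eq_of_lt (by omega) hhlt
        have hdlt : dt < 86400 := by
          by_contra hc
          have : 1 ≤ dt / 86400 := Int.le_ediv_iff_mul_le (by omega) |>.mpr (by omega)
          omega
        rw [hdiv1, hdiv2]
        simp only [hm, hh, hd, if_neg hm, hge, if_neg hge, if_pos hdlt, pvJoin3, hone,
          hhmod, pvTimeStr]
        simp [hm, hh, hmmpos, hhpos, hhmod, pvZf (dt / 3600) (by omega) (by omega), pvZf (dt / 60 % 60) hmmod0 hmmod1,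
          pvZf (dt % 60) hss0 hss1]
      · -- dt ≥ 86400: both print "{dd} days, hh:mm:ss" with all units reduced
        have hddpos : 0 < dt / 86400 := by omega
        have hge2 : ¬ dt < 86400 := by
          by_contra hc
          have : dt / 86400 = 0 := Int.ediv_eq_zero_of_lt h (by omega)
          exact hd this
        have hhmod0 : 0 ≤ dt / 3600 % 24 := Int.emod_nonneg _ (by omega)
        have hhmod1 : dt / 3600 % 24 < 24 := Int.emod_lt_of_pos _ (by omega)
        rw [hdiv1, hdiv2]
        simp only [hm, hh, hd, if_neg hm, hge, if_neg hge, if_neg hge2, pvJoin3, hone,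
          pvTimeStr]
        simp [hm, hh, hd, hmmpos, hhpos, hddpos, pvZf (dt / 3600 % 24) hhmod0 (by omega), pvZf (dt / 60 % 60) hmmod0 hmmod1,
          pvZf (dt % 60) hss0 hss1]

-- ===== VERDICT (by name: the statement is the Claim_ definition above) =====
theorem tmdelta_fmt_spec : Claim_equal_tmdelta_fmt := by
  intro dt _
  unfold Spec_tmdelta_fmt
  by_cases hneg : dt < 0
  · rw [tmdelta_fmt, tmdelta_fmt_alt]
    simp only [hneg, dite_true]
    rw [tmdelta_eq_of_nonneg (-dt) (by omega)]
  · exact tmdelta_eq_of_nonneg dt (by omega)
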